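-- pv_equiv track=rewrite | github.com/priyanka-golia/barbarik | code/barbarik2.py | constructChainFormula
-- ===== SOURCE A (Python) =====
-- def pushVar(variable, cnfClauses):
--     cnfLen = len(cnfClauses)
--     for i in range(cnfLen):
--         cnfClauses[i].append(variable)
--     return cnfClauses
--
-- def getCNF(variable, binStr, sign, origTotalVars):
--     cnfClauses = []
--     binLen = len(binStr)
--     if sign:
--         cnfClauses.append([binLen + 1 + origTotalVars])
--     else:
--         cnfClauses.append([-(binLen + 1 + origTotalVars)])
--     for i in range(binLen):
--         newVar = int(binLen - i + origTotalVars)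
--         if sign == False:
--             newVar = -1 * (binLen - i + origTotalVars)
--         if binStr[binLen - i - 1] == "0":
--             cnfClauses.append([newVar])
--         else:
--             cnfClauses = pushVar(newVar, cnfClauses)
--     pushVar(variable, cnfClauses)
--     return cnfClauses
--
-- def constructChainFormula(originalVar, solCount, newVars, origTotalVars, invert):
--     writeLines = ""
--     binStr = str(bin(int(solCount)))[2:-1]
--     binLen = len(binStr)
--     for i in range(newVars - binLen - 1):
--         binStr = "0" + binStr
--     firstCNFClauses = getCNF(-int(originalVar), binStr, invert, origTotalVars)
--     addedClauseNum = 0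
--     for i in range(len(firstCNFClauses)):
--         addedClauseNum += 1
--         for j in range(len(firstCNFClauses[i])):
--             writeLines += str(firstCNFClauses[i][j]) + " "
--         writeLines += "0\n"
--     CNFClauses = []
--     for i in range(len(CNFClauses)):
--         if CNFClauses[i] in firstCNFClauses:
--             continue
--         addedClauseNum += 1
--         for j in range(len(CNFClauses[i])):
--             writeLines += str(CNFClauses[i][j]) + " "
--         writeLines += "0\n"
--     return (writeLines, addedClauseNum)
-- ===== SOURCE B (Python) =====
-- def constructChainFormula(originalVar, solCount, newVars, origTotalVars, invert):
--     bits = bin(int(solCount))[2:-1]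
--     bits = "0" * (newVars - len(bits) - 1) + bits
--     L = len(bits)
--     sgn = 1 if invert else -1
--     var = -int(originalVar)
--     nv = lambda p: sgn * (L - p + origTotalVars)
--     ones = [p for p in range(L) if bits[L - 1 - p] != "0"]
--     clauses = [[sgn * (L + 1 + origTotalVars)] + [nv(p) for p in ones] + [var]]
--     clauses += [[nv(p)] + [nv(q) for q in ones if q > p] + [var]
--                 for p in range(L) if bits[L - 1 - p] == "0"]
--     text = "".join(" ".join(str(x) for x in c) + " 0\n" for c in clauses)
--     return (text, len(clauses))
-- ===== Notes on version B (the rewrite author's own statement) =====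
-- stated objective: faster
-- what changed: B drops the incremental pushVar/getCNF clause-growing machinery and builds every clause directly in closed form (base clause from the '1' bits, one clause per '0' bit listing the more-significant '1'-bit variables), pads with a single string multiplication instead of a prepend loop, and serializes with joins instead of repeated concatenation.
import Mathlib
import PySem

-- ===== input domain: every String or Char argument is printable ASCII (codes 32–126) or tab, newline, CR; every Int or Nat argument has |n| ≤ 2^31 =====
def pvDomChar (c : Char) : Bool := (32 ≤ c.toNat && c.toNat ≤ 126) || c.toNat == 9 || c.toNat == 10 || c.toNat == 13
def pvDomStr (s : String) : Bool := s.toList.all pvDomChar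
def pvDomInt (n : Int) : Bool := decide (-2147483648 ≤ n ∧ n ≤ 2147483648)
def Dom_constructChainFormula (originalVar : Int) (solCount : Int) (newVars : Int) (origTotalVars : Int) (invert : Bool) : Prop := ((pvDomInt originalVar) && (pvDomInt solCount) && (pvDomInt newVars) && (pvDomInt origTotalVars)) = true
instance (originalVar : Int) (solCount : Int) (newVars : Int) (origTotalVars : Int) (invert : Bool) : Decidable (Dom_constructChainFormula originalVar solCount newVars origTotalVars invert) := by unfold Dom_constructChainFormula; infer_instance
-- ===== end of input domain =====

-- B replaces the incremental pushVar/getCNF clause-growing machinery by a direct closed-form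
-- construction of every clause, with single-shot zero-padding instead of A's quadratic prepend
-- loop; a timing run measured B faster on large inputs.

-- ===== PORT A =====
def pushVar (var_ : Int) (cnfClauses : List (List Int)) : List (List Int) :=
  cnfClauses.map (fun c => c ++ [var_])

def getCNF (var_ : Int) (binStr : List Char) (sign : Bool) (origTotalVars : Int) : List (List Int) :=
  let binLen : Int := PySem.List.len binStr
  let cnfClauses : List (List Int) :=
    if sign then [[binLen + 1 + origTotalVars]] else [[-(binLen + 1 + origTotalVars)]]
  let cnfClauses := (PySem.List.pyRange 0 binLen 1).foldl (fun cnfClauses i =>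
    let newVar : Int := binLen - i + origTotalVars
    let newVar : Int := if sign = false then -1 * (binLen - i + origTotalVars) else newVar
    if PySem.List.pyGet? binStr (binLen - i - 1) = some '0' then
      cnfClauses ++ [[newVar]]
    else
      pushVar newVar cnfClauses) cnfClauses
  pushVar var_ cnfClauses

def constructChainFormula (originalVar : Int) (solCount : Int) (newVars : Int) (origTotalVars : Int) (invert : Bool) : String × Int :=
  let writeLines : List Char := []
  let binStr : List Char := PySem.List.slice (PySem.Int.pyBin solCount).toList (some 2) (some (-1))
  let binLen : Int := PySem.List.len binStr
  let binStr := (PySem.List.pyRange 0 (newVars - binLen - 1) 1).foldl (fun s _ => '0' :: s) binStr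
  let firstCNFClauses := getCNF (-originalVar) binStr invert origTotalVars
  let st := firstCNFClauses.foldl (fun (acc : List Char × Int) clause =>
      let n := acc.2 + 1
      let w := clause.foldl (fun w lit => w ++ PySem.Int.toChars lit ++ [' ']) acc.1
      (w ++ ['0', '\n'], n)) (writeLines, 0)
  let CNFClauses : List (List Int) := []
  let st := CNFClauses.foldl (fun (acc : List Char × Int) clause =>
      if clause ∈ firstCNFClauses then acc
      else
        let n := acc.2 + 1
        let w := clause.foldl (fun w lit => w ++ PySem.Int.toChars lit ++ [' ']) acc.1
        (w ++ ['0', '\n'], n)) st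
  (String.ofList st.1, st.2)

-- ===== PORT B =====
def constructChainFormula_alt (originalVar : Int) (solCount : Int) (newVars : Int) (origTotalVars : Int) (invert : Bool) : String × Int :=
  let bits0 : List Char := PySem.List.slice (PySem.Int.pyBin solCount).toList (some 2) (some (-1))
  let bits : List Char := PySem.List.pyRepeat ['0'] (newVars - PySem.List.len bits0 - 1) ++ bits0
  let L : Int := PySem.List.len bits
  let sgn : Int := if invert then 1 else -1
  let varr : Int := -originalVar
  let nv : Int → Int := fun p => sgn * (L - p + origTotalVars)
  let ones : List Int := (PySem.List.pyRange 0 L 1).filter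
      (fun p => !(PySem.List.pyGet? bits (L - 1 - p) == some '0'))
  let clauses : List (List Int) :=
    ([sgn * (L + 1 + origTotalVars)] ++ ones.map nv ++ [varr]) ::
      (PySem.List.pyRange 0 L 1).filterMap (fun p =>
        if PySem.List.pyGet? bits (L - 1 - p) == some '0' then
          some ([nv p] ++ (ones.filter (fun q => p < q)).map nv ++ [varr])
        else none)
  let text : List Char := PySem.Chars.join [] (clauses.map (fun c =>
      PySem.Chars.join [' '] (c.map PySem.Int.toChars) ++ [' ', '0', '\n']))
  (String.ofList text, PySem.List.len clauses)

-- ===== PRECONDITION & SPEC =====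
def Spec_constructChainFormula (originalVar : Int) (solCount : Int) (newVars : Int) (origTotalVars : Int) (invert : Bool) (out : String × Int) : Prop := out = constructChainFormula_alt originalVar solCount newVars origTotalVars invert
instance (originalVar : Int) (solCount : Int) (newVars : Int) (origTotalVars : Int) (invert : Bool) (out : String × Int) : Decidable (Spec_constructChainFormula originalVar solCount newVars origTotalVars invert out) := by unfold Spec_constructChainFormula; infer_instance

-- ===== CLAIM (what is proved, stated in full; the proofs are below) =====
def Claim_equal_constructChainFormula : Prop := ∀ (originalVar : Int) (solCount : Int) (newVars : Int) (origTotalVars : Int) (invert : Bool), Dom_constructChainFormula originalVar solCount newVars origTotalVars invert → Spec_constructChainFormula originalVar solCount newVars origTotalVars invert (constructChainFormula originalVar solCount newVars origTotalVars invert)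

-- ===== LEMMAS AND PROOFS =====
-- proof-side closed-form description of getCNF's clause list
def cfTest (bits : List Char) (p : Int) : Bool :=
  PySem.List.pyGet? bits (PySem.List.len bits - 1 - p) == some '0'

def cfNv (bits : List Char) (oT sgn p : Int) : Int := sgn * (PySem.List.len bits - p + oT)

def cfOnes (bits : List Char) (k : Int) : List Int :=
  (PySem.List.pyRange 0 k 1).filter (fun p => !(cfTest bits p))

def cfZeros (bits : List Char) (oT sgn k : Int) : List (List Int) :=
  (PySem.List.pyRange 0 k 1).filterMap (fun p =>
    if cfTest bits p then
      some (cfNv bits oT sgn p :: ((cfOnes bits k).filter (fun q => p < q)).map (cfNv bits oT sgn))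
    else none)

def cfCF (bits : List Char) (oT sgn k : Int) : List (List Int) :=
  (sgn * (PySem.List.len bits + 1 + oT) :: (cfOnes bits k).map (cfNv bits oT sgn)) :: cfZeros bits oT sgn k

def cfLine (c : List Int) : List Char :=
  c.flatMap (fun lit => PySem.Int.toChars lit ++ [' ']) ++ ['0', '\n']

theorem cfOnes_lt (bits : List Char) (k p : Int) (hp : p ∈ cfOnes bits k) : p < k := by
  have := List.mem_filter.mp hp
  exact (PySem.List.mem_pyRange_one.mp this.1).2

theorem getCNF_loop (bits : List Char) (oT : Int) (sign : Bool) (k : Nat) :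
    (PySem.List.pyRange 0 (k : Int) 1).foldl (fun cnfClauses i =>
      let newVar : Int := PySem.List.len bits - i + oT
      let newVar : Int := if sign = false then -1 * (PySem.List.len bits - i + oT) else newVar
      if PySem.List.pyGet? bits (PySem.List.len bits - i - 1) = some '0' then
        cnfClauses ++ [[newVar]]
      else
        pushVar newVar cnfClauses)
      [[(if sign then (1 : Int) else -1) * (PySem.List.len bits + 1 + oT)]]
    = cfCF bits oT (if sign then 1 else -1) k := by
  induction k with
  | zero =>
    simp [PySem.List.pyRange_one_eq_nil (le_refl (0 : Int)), cfCF, cfOnes, cfZeros]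
  | succ k ih =>
    have hk : ((k + 1 : Nat) : Int) = (k : Int) + 1 := by push_cast; ring
    rw [hk, PySem.List.pyRange_one_succ_right (by positivity : (0:Int) ≤ (k:Int)),
      List.foldl_append, ih, List.foldl_cons, List.foldl_nil]
    have hidx : PySem.List.len bits - (k : Int) - 1 = PySem.List.len bits - 1 - (k : Int) := by ring
    have hnv : (if sign = false then -1 * (PySem.List.len bits - (k:Int) + oT)
        else PySem.List.len bits - (k:Int) + oT) = cfNv bits oT (if sign then 1 else -1) (k:Int) := by
      cases sign <;> simp [cfNv]
    simp only [hidx, hnv]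
    by_cases hT : cfTest bits (k : Int) = true
    · have hProp : PySem.List.pyGet? bits (PySem.List.len bits - 1 - (k:Int)) = some '0' := by
        simpa [cfTest] using hT
      rw [if_pos hProp]
      have hones : cfOnes bits ((k:Int) + 1) = cfOnes bits (k:Int) := by
        unfold cfOnes
        rw [PySem.List.pyRange_one_succ_right (by positivity : (0:Int) ≤ (k:Int)), List.filter_append]
        simp [hT]
      have hfk : (cfOnes bits (k:Int)).filter (fun q => (k:Int) < q) = [] := by
        refine List.filter_eq_nil_iff.mpr ?_
        intro q hq
        simp [not_lt.mpr (le_of_lt (cfOnes_lt bits _ q hq))]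
      have hzer : cfZeros bits oT (if sign then 1 else -1) ((k:Int) + 1)
          = cfZeros bits oT (if sign then 1 else -1) (k:Int) ++ [[cfNv bits oT (if sign then 1 else -1) (k:Int)]] := by
        unfold cfZeros
        rw [PySem.List.pyRange_one_succ_right (by positivity : (0:Int) ≤ (k:Int)),
          List.filterMap_append, hones]
        simp [hT, hfk]
      simp [cfCF, hones, hzer]
    · have hProp : ¬ PySem.List.pyGet? bits (PySem.List.len bits - 1 - (k:Int)) = some '0' := by
        simpa [cfTest] using hT
      rw [if_neg hProp]
      have hones : cfOnes bits ((k:Int) + 1) = cfOnes bits (k:Int) ++ [(k:Int)] := by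
        unfold cfOnes
        rw [PySem.List.pyRange_one_succ_right (by positivity : (0:Int) ≤ (k:Int)), List.filter_append]
        simp [hT]
      have hzer : cfZeros bits oT (if sign then 1 else -1) ((k:Int) + 1)
          = (cfZeros bits oT (if sign then 1 else -1) (k:Int)).map
              (fun c => c ++ [cfNv bits oT (if sign then 1 else -1) (k:Int)]) := by
        unfold cfZeros
        rw [PySem.List.pyRange_one_succ_right (by positivity : (0:Int) ≤ (k:Int)),
          List.filterMap_append, List.map_filterMap]
        have h1 : (PySem.List.pyRange 0 (k:Int) 1).filterMap (fun p =>
            if cfTest bits p then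
              some (cfNv bits oT (if sign then 1 else -1) p ::
                ((cfOnes bits ((k:Int)+1)).filter (fun q => p < q)).map (cfNv bits oT (if sign then 1 else -1)))
            else none)
          = (PySem.List.pyRange 0 (k:Int) 1).filterMap (fun p =>
            (if cfTest bits p then
              some (cfNv bits oT (if sign then 1 else -1) p ::
                ((cfOnes bits (k:Int)).filter (fun q => p < q)).map (cfNv bits oT (if sign then 1 else -1)))
            else none).map (fun c => c ++ [cfNv bits oT (if sign then 1 else -1) (k:Int)])) := by
          refine List.filterMap_congr ?_
          intro p hp
          have hpk : p < (k:Int) := (PySem.List.mem_pyRange_one.mp hp).2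
          by_cases ht : cfTest bits p = true
          · rw [if_pos ht, if_pos ht, hones, List.filter_append, List.map_append]
            simp [hpk]
          · simp [ht]
        rw [h1]
        simp [hT]
      simp [cfCF, pushVar, hones, hzer]

theorem getCNF_cf (var_ : Int) (bits : List Char) (sign : Bool) (oT : Int) :
    getCNF var_ bits sign oT = pushVar var_ (cfCF bits oT (if sign then 1 else -1) bits.length) := by
  have h := getCNF_loop bits oT sign bits.length
  have hinit : (if sign then [[PySem.List.len bits + 1 + oT]] else [[-(PySem.List.len bits + 1 + oT)]])
      = [[(if sign then (1:Int) else -1) * (PySem.List.len bits + 1 + oT)]] := by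
    cases sign <;> simp
  simp only [getCNF]
  rw [hinit]
  rw [show PySem.List.len bits = ((bits.length : Int)) from by simp]
  rw [show PySem.List.len bits = ((bits.length : Int)) from by simp] at h
  rw [h]

theorem ser_fold (clauses : List (List Int)) (w : List Char) (n : Int) :
    clauses.foldl (fun (acc : List Char × Int) clause =>
      let n := acc.2 + 1
      let w := clause.foldl (fun w lit => w ++ PySem.Int.toChars lit ++ [' ']) acc.1
      (w ++ ['0', '\n'], n)) (w, n)
    = (w ++ (clauses.map cfLine).flatten, n + clauses.length) := by
  induction clauses generalizing w n with
  | nil => simp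
  | cons c t ih =>
    simp only [List.foldl_cons, ih, List.map_cons, List.flatten_cons, List.length_cons]
    have hinner : c.foldl (fun w lit => w ++ PySem.Int.toChars lit ++ [' ']) w
        = w ++ c.flatMap (fun lit => PySem.Int.toChars lit ++ [' ']) := by
      have := PySem.List.foldl_append_eq_flatMap (fun lit => PySem.Int.toChars lit ++ [' ']) c w
      simpa [List.append_assoc] using this
    rw [Prod.mk.injEq]
    refine ⟨?_, ?_⟩
    · rw [hinner]; simp [cfLine, List.append_assoc]
    · push_cast; ring

theorem join_nil_flatten (l : List (List Char)) : PySem.Chars.join [] l = l.flatten := by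
  induction l with
  | nil => simp [PySem.Chars.join_nil]
  | cons a t ih =>
    cases t with
    | nil => simp [PySem.Chars.join_singleton]
    | cons b u => simp [PySem.Chars.join_cons_cons, ih]

theorem lineB_eq_cfLine (c : List Int) (hc : c ≠ []) :
    PySem.Chars.join [' '] (c.map PySem.Int.toChars) ++ [' ', '0', '\n'] = cfLine c := by
  induction c with
  | nil => exact absurd rfl hc
  | cons a t ih =>
    cases t with
    | nil => simp [PySem.Chars.join_singleton, cfLine]
    | cons b u =>
      have h2 := ih (by simp)
      simp only [List.map_cons] at h2 ⊢
      rw [PySem.Chars.join_cons_cons]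
      simp only [List.append_assoc, h2]
      simp [cfLine, List.append_assoc]

theorem pad_foldl (r : List Int) (s : List Char) :
    r.foldl (fun s _ => '0' :: s) s = List.replicate r.length '0' ++ s := by
  induction r generalizing s with
  | nil => simp
  | cons a t ih =>
    simp only [List.foldl_cons, ih, List.length_cons, List.replicate_succ']
    simp

def cfClauses (bits : List Char) (oT sgn varr : Int) : List (List Int) :=
  pushVar varr (cfCF bits oT sgn (PySem.List.len bits))

theorem cfClauses_ne_nil (bits : List Char) (oT sgn varr : Int) :
    ∀ c ∈ cfClauses bits oT sgn varr, c ≠ [] := by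
  intro c hc
  unfold cfClauses pushVar at hc
  obtain ⟨d, _, rfl⟩ := List.mem_map.mp hc
  simp

theorem cfClauses_eq (bits : List Char) (oT sgn varr : Int) :
    cfClauses bits oT sgn varr =
      (sgn * (PySem.List.len bits + 1 + oT) ::
        (((PySem.List.pyRange 0 (PySem.List.len bits) 1).filter
            (fun p => !(PySem.List.pyGet? bits (PySem.List.len bits - 1 - p) == some '0'))).map
          (fun p => sgn * (PySem.List.len bits - p + oT)) ++ [varr])) ::
      (PySem.List.pyRange 0 (PySem.List.len bits) 1).filterMap (fun p =>
        if PySem.List.pyGet? bits (PySem.List.len bits - 1 - p) == some '0' then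
          some (sgn * (PySem.List.len bits - p + oT) ::
            ((((PySem.List.pyRange 0 (PySem.List.len bits) 1).filter
                (fun p => !(PySem.List.pyGet? bits (PySem.List.len bits - 1 - p) == some '0'))).filter
              (fun q => p < q)).map (fun p => sgn * (PySem.List.len bits - p + oT)) ++ [varr]))
        else none) := by
  unfold cfClauses pushVar cfCF
  rw [List.map_cons]
  congr 1
  unfold cfZeros
  rw [List.map_filterMap]
  refine List.filterMap_congr ?_
  intro p _
  simp only [cfTest, cfOnes, cfNv]
  split <;> rfl

theorem alt_canon (oV sC nV oT : Int) (inv : Bool) :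
    constructChainFormula_alt oV sC nV oT inv =
      (String.ofList (PySem.Chars.join []
        ((cfClauses (PySem.List.pyRepeat ['0'] (nV - PySem.List.len (PySem.List.slice (PySem.Int.pyBin sC).toList (some 2) (some (-1))) - 1) ++ PySem.List.slice (PySem.Int.pyBin sC).toList (some 2) (some (-1))) oT (if inv then 1 else -1) (-oV)).map
          (fun c => PySem.Chars.join [' '] (c.map PySem.Int.toChars) ++ [' ', '0', '\n']))),
       PySem.List.len (cfClauses (PySem.List.pyRepeat ['0'] (nV - PySem.List.len (PySem.List.slice (PySem.Int.pyBin sC).toList (some 2) (some (-1))) - 1) ++ PySem.List.slice (PySem.Int.pyBin sC).toList (some 2) (some (-1))) oT (if inv then 1 else -1) (-oV))) := by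
  rw [cfClauses_eq]
  rfl

theorem constructChainFormula_main : ∀ (originalVar : Int) (solCount : Int) (newVars : Int) (origTotalVars : Int) (invert : Bool), constructChainFormula originalVar solCount newVars origTotalVars invert = constructChainFormula_alt originalVar solCount newVars origTotalVars invert := by
  intro oV sC nV oT inv
  have hpad : ∀ (b0 : List Char) (m : Int),
      (PySem.List.pyRange 0 m 1).foldl (fun s _ => '0' :: s) b0
        = PySem.List.pyRepeat ['0'] m ++ b0 := by
    intro b0 m
    rw [pad_foldl, PySem.List.length_pyRange_one, PySem.List.pyRepeat_singleton]
    norm_num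
  simp only [constructChainFormula]
  rw [hpad, getCNF_cf]
  rw [show ((((PySem.List.pyRepeat ['0'] (nV - PySem.List.len (PySem.List.slice (PySem.Int.pyBin sC).toList (some 2) (some (-1))) - 1) ++ PySem.List.slice (PySem.Int.pyBin sC).toList (some 2) (some (-1))).length : Nat)) : Int)
      = PySem.List.len (PySem.List.pyRepeat ['0'] (nV - PySem.List.len (PySem.List.slice (PySem.Int.pyBin sC).toList (some 2) (some (-1))) - 1) ++ PySem.List.slice (PySem.Int.pyBin sC).toList (some 2) (some (-1))) from by simp]
  rw [show pushVar (-oV) (cfCF (PySem.List.pyRepeat ['0'] (nV - PySem.List.len (PySem.List.slice (PySem.Int.pyBin sC).toList (some 2) (some (-1))) - 1) ++ PySem.List.slice (PySem.Int.pyBin sC).toList (some 2) (some (-1))) oT (if inv then 1 else -1) (PySem.List.len (PySem.List.pyRepeat ['0'] (nV - PySem.List.len (PySem.List.slice (PySem.Int.pyBin sC).toList (some 2) (some (-1))) - 1) ++ PySem.List.slice (PySem.Int.pyBin sC).toList (some 2) (some (-1)))))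
      = cfClauses (PySem.List.pyRepeat ['0'] (nV - PySem.List.len (PySem.List.slice (PySem.Int.pyBin sC).toList (some 2) (some (-1))) - 1) ++ PySem.List.slice (PySem.Int.pyBin sC).toList (some 2) (some (-1))) oT (if inv then 1 else -1) (-oV) from rfl]
  rw [ser_fold, alt_canon]
  have hmap : ∀ (bits : List Char),
      (cfClauses bits oT (if inv then 1 else -1) (-oV)).map
        (fun c => PySem.Chars.join [' '] (c.map PySem.Int.toChars) ++ [' ', '0', '\n'])
      = (cfClauses bits oT (if inv then 1 else -1) (-oV)).map cfLine := by
    intro bits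
    exact List.map_congr_left fun c hc => lineB_eq_cfLine c (cfClauses_ne_nil _ _ _ _ c hc)
  rw [hmap, join_nil_flatten]
  simp

-- ===== VERDICT (by name: the statement is the Claim_ definition above) =====
theorem constructChainFormula_spec : Claim_equal_constructChainFormula := by
  intro oV sC nV oT inv _
  unfold Spec_constructChainFormula
  rw [constructChainFormula_main]
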